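-- pv_equiv track=rewrite | github.com/doanane/DSA_Problem_Solving | scooter.py | solution
-- ===== SOURCE A (Python) =====
-- def solution(finish, scooters):
--     scooters.sort()
--     i = 0
--     total = 0
--     current =0
--     n = len(scooters)
--
--     while current < finish:
--         while i < n and scooters[i]< current:
--             i +=1
--         if i == n:
--             break
--         ride_start = scooters[i]
--         if ride_start > finish:
--             break
--         current = ride_start
--         ride_end = min(ride_start + 10, finish)
--         total += ride_end -  ride_start
--         current = ride_end
--
--         if ride_end == ride_start:
--             i +=1
--         else:
--             i +=1
--
--     return total
-- ===== SOURCE B (Python) =====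
-- def solution(finish, scooters):
--     scooters.sort()
--     n = len(scooters)
--     total = 0
--     current = 0
--     while current < finish:
--         # binary search: least index with scooters[idx] >= current
--         lo, hi = 0, n
--         while lo < hi:
--             mid = (lo + hi) // 2
--             if scooters[mid] < current:
--                 lo = mid + 1
--             else:
--                 hi = mid
--         if lo == n:
--             break
--         s = scooters[lo]
--         if s > finish:
--             break
--         ride_end = min(s + 10, finish)
--         total += ride_end - s
--         current = ride_end
--     return total
-- ===== Notes on version B (the rewrite author's own statement) =====
-- stated objective: alternative
-- what changed: B drops A's persistent scan index i and its nested skip loop: each iteration runs a hand-rolled bisect_left binary search on the sorted list to jump straight to the first scooter at or past the current position.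
import Mathlib
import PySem

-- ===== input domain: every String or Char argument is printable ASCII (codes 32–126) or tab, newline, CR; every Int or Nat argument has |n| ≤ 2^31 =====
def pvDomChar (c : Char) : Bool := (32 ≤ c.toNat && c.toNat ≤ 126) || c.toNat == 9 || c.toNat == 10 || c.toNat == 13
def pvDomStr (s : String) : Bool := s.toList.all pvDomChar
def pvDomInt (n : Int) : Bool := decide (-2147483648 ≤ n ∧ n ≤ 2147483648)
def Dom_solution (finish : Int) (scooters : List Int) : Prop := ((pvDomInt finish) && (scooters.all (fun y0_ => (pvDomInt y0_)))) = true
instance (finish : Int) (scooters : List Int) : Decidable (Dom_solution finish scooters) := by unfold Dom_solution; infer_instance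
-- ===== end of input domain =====

-- B replaces A's persistent index and nested skip loop by a per-ride hand-rolled binary search
-- (alternative decomposition, no speed claim); both A and B sort the scooters list in place,
-- the equivalence proved here is about the return value.

-- ===== PORT A =====
-- inner 'while i < n and scooters[i] < current: i += 1'
def solSkip (sc : List Int) (n : Nat) (current : Int) (i : Nat) : Nat :=
  if h : i < n ∧ sc.getD i 0 < current then solSkip sc n current (i + 1) else i
termination_by n - i
decreasing_by omega

-- termination helpers for the outer loop (cited by solLoop's decreasing_by)
theorem solSkip_ge (sc : List Int) (n : Nat) (current : Int) (i : Nat) :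
    i ≤ solSkip sc n current i := by
  fun_induction solSkip sc n current i with
  | case1 i h ih => omega
  | case2 i h => omega

theorem solSkip_le (sc : List Int) (n : Nat) (current : Int) (i : Nat) (hi : i ≤ n) :
    solSkip sc n current i ≤ n := by
  fun_induction solSkip sc n current i with
  | case1 i h ih => exact ih (by omega)
  | case2 i h => exact hi

-- outer 'while current < finish' loop of A (i increases every iteration; measure n - i)
def solLoop (finish : Int) (sc : List Int) (n : Nat) (i : Nat) (total current : Int)
    (hi : i ≤ n) : Int :=
  if current < finish then
    let i' := solSkip sc n current i
    if h : i' = n then total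
    else
      let ride_start := sc.getD i' 0
      if ride_start > finish then total
      else
        -- ride_end = min(ride_start + 10, finish); both branches of A's final if do i += 1
        solLoop finish sc n (i' + 1) (total + (min (ride_start + 10) finish - ride_start))
          (min (ride_start + 10) finish)
          (by have := solSkip_le sc n current i hi; omega)
  else total
termination_by n - i
decreasing_by
  have h1 := solSkip_ge sc n current i
  have h2 := solSkip_le sc n current i hi
  omega

def solution (finish : Int) (scooters : List Int) : Int :=
  let sc := PySem.List.sorted scooters (fun x => x) false
  solLoop finish sc sc.length 0 0 0 (by omega)

-- ===== PORT B =====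
-- hand-rolled bisect_left: least index in [lo, hi) whose element is ≥ current
def altBisect (sc : List Int) (current : Int) (lo hi : Nat) : Nat :=
  if h : lo < hi then
    let mid := (lo + hi) / 2
    if sc.getD mid 0 < current then altBisect sc current (mid + 1) hi
    else altBisect sc current lo mid
  else lo
termination_by hi - lo
decreasing_by all_goals omega

-- B's 'while current < finish' loop; fuel is only a totality guard (n + 1 always suffices,
-- proved in the equivalence below)
def altLoop (finish : Int) (sc : List Int) (n : Nat) (fuel : Nat) (total current : Int) : Int :=
  match fuel with
  | 0 => total
  | fuel + 1 =>
    if current < finish then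
      let lo := altBisect sc current 0 n
      if lo = n then total
      else
        let s := sc.getD lo 0
        if s > finish then total
        else altLoop finish sc n fuel (total + (min (s + 10) finish - s)) (min (s + 10) finish)
    else total

def solution_alt (finish : Int) (scooters : List Int) : Int :=
  let sc := PySem.List.sorted scooters (fun x => x) false
  altLoop finish sc sc.length (sc.length + 1) 0 0

-- ===== PRECONDITION & SPEC =====
def Spec_solution (finish : Int) (scooters : List Int) (out : Int) : Prop := out = solution_alt finish scooters
instance (finish : Int) (scooters : List Int) (out : Int) : Decidable (Spec_solution finish scooters out) := by unfold Spec_solution; infer_instance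

-- ===== CLAIM (what is proved, stated in full; the proofs are below) =====
def Claim_equal_solution : Prop := ∀ (finish : Int) (scooters : List Int), Dom_solution finish scooters → Spec_solution finish scooters (solution finish scooters)

-- ===== LEMMAS AND PROOFS =====

-- sortedness as index monotonicity of getD
theorem getD_mono (sc : List Int) (h : sc.Pairwise (· ≤ ·)) :
    ∀ a b : Nat, a ≤ b → b < sc.length → sc.getD a 0 ≤ sc.getD b 0 := by
  intro a b hab hb
  rcases Nat.eq_or_lt_of_le hab with rfl | hlt
  · exact le_refl _
  · rw [List.getD_eq_getElem sc 0 (by omega), List.getD_eq_getElem sc 0 hb]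
    exact List.pairwise_iff_getElem.mp h a b (by omega) hb hlt

-- solSkip returns the least index ≥ i whose element is ≥ current (or n)
theorem solSkip_spec (sc : List Int) (n : Nat) (c : Int) (i : Nat) (hi : i ≤ n)
    (hn : n = sc.length) :
    (∀ j, i ≤ j → j < solSkip sc n c i → sc.getD j 0 < c) ∧
    (solSkip sc n c i < n → ¬ sc.getD (solSkip sc n c i) 0 < c) := by
  fun_induction solSkip sc n c i with
  | case1 i h ih =>
    obtain ⟨h1, h2⟩ := ih (by omega)
    refine ⟨?_, h2⟩
    intro j hj1 hj2
    rcases Nat.eq_or_lt_of_le hj1 with rfl | hlt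
    · exact h.2
    · exact h1 j hlt hj2
  | case2 i h =>
    refine ⟨fun j hj1 hj2 => by omega, fun hlt => ?_⟩
    intro hc
    exact h ⟨hlt, hc⟩

-- altBisect returns the least index in [lo, hi] whose element is ≥ current
theorem altBisect_spec (sc : List Int) (c : Int)
    (mono : ∀ a b : Nat, a ≤ b → b < sc.length → sc.getD a 0 ≤ sc.getD b 0)
    (lo hi : Nat) (hlh : lo ≤ hi) (hhn : hi ≤ sc.length)
    (hbelow : ∀ j, j < lo → sc.getD j 0 < c)
    (habove : ∀ j, hi ≤ j → j < sc.length → ¬ sc.getD j 0 < c) :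
    lo ≤ altBisect sc c lo hi ∧ altBisect sc c lo hi ≤ hi ∧
    (∀ j, j < altBisect sc c lo hi → sc.getD j 0 < c) ∧
    (altBisect sc c lo hi < sc.length → ¬ sc.getD (altBisect sc c lo hi) 0 < c) := by
  fun_induction altBisect sc c lo hi with
  | case1 lo hi h mid hmid ih =>
    have hmidlt : mid < hi := by omega
    obtain ⟨r1, r2, r3, r4⟩ := ih (by omega) hhn
      (by
        intro j hj
        exact lt_of_le_of_lt (mono j mid (by omega) (by omega)) hmid)
      habove
    exact ⟨by omega, by omega, r3, r4⟩
  | case2 lo hi h mid hmid ih =>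
    have hmidlt : mid < hi := by omega
    obtain ⟨r1, r2, r3, r4⟩ := ih (by omega) (by omega) hbelow
      (by
        intro j hj1 hj2 hc
        exact hmid (lt_of_le_of_lt (mono mid j hj1 hj2) hc))
    exact ⟨r1, by omega, r3, r4⟩
  | case3 lo hi h =>
    refine ⟨le_refl _, by omega, hbelow, fun hlt => habove lo (by omega) hlt⟩

-- two indices that are both "least index with element ≥ c" coincide
theorem least_uniq (sc : List Int) (c : Int) (n : Nat) (hn : n = sc.length)
    (r1 r2 : Nat) (h1n : r1 ≤ n) (h2n : r2 ≤ n)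
    (b1 : ∀ j, j < r1 → sc.getD j 0 < c) (s1 : r1 < n → ¬ sc.getD r1 0 < c)
    (b2 : ∀ j, j < r2 → sc.getD j 0 < c) (s2 : r2 < n → ¬ sc.getD r2 0 < c) :
    r1 = r2 := by
  rcases Nat.lt_trichotomy r1 r2 with h | h | h
  · exact absurd (b2 r1 h) (s1 (by omega))
  · exact h
  · exact absurd (b1 r2 h) (s2 (by omega))

-- main simulation: A's loop equals B's loop given sortedness and the invariant that
-- everything below i has been passed (only needed while the loop is still running)
theorem loop_eq (finish : Int) (sc : List Int)
    (mono : ∀ a b : Nat, a ≤ b → b < sc.length → sc.getD a 0 ≤ sc.getD b 0) :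
    ∀ (fuel i : Nat) (total current : Int) (hi : i ≤ sc.length),
      (current < finish → ∀ j, j < i → sc.getD j 0 < current) →
      sc.length - i < fuel →
      solLoop finish sc sc.length i total current hi =
        altLoop finish sc sc.length fuel total current := by
  intro fuel
  induction fuel with
  | zero => intro i total current hi hinv hf; omega
  | succ fuel ih =>
    intro i total current hi hinv hf
    rw [solLoop, altLoop]
    by_cases hcf : current < finish
    · simp only [if_pos hcf]
      obtain ⟨sk1, sk2⟩ := solSkip_spec sc sc.length current i hi rfl
      have hge := solSkip_ge sc sc.length current i
      have hle := solSkip_le sc sc.length current i hi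
      have hbel : ∀ j, j < solSkip sc sc.length current i → sc.getD j 0 < current := by
        intro j hj
        by_cases hji : j < i
        · exact hinv hcf j hji
        · exact sk1 j (by omega) hj
      obtain ⟨a1, a2, a3, a4⟩ := altBisect_spec sc current mono 0 sc.length
        (by omega) (le_refl _) (by omega) (by intro j hj1 hj2; omega)
      have heq : altBisect sc current 0 sc.length = solSkip sc sc.length current i :=
        (least_uniq sc current sc.length rfl _ _ hle a2 hbel sk2 a3 a4).symm
      rw [heq]
      by_cases hn : solSkip sc sc.length current i = sc.length
      · rw [dif_pos hn, if_pos hn]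
      · rw [dif_neg hn, if_neg hn]
        have hscur : current ≤ sc.getD (solSkip sc sc.length current i) 0 := by
          have := sk2 (by omega); omega
        by_cases hsf : sc.getD (solSkip sc sc.length current i) 0 > finish
        · rw [if_pos hsf, if_pos hsf]
        · rw [if_neg hsf, if_neg hsf]
          apply ih
          · intro hlt j hj
            have hjle : sc.getD j 0 ≤ sc.getD (solSkip sc sc.length current i) 0 := by
              rcases Nat.eq_or_lt_of_le (Nat.le_of_lt_succ hj) with rfl | hlt2
              · exact le_refl _
              · exact le_of_lt (lt_of_lt_of_le (hbel j hlt2) hscur)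
            omega
          · omega
    · simp only [if_neg hcf]

-- ===== VERDICT (by name: the statement is the Claim_ definition above) =====
theorem solution_spec : Claim_equal_solution := by
  intro finish scooters _
  unfold Spec_solution solution solution_alt
  have hp : (PySem.List.sorted scooters (fun x => x) false).Pairwise (· ≤ ·) := by
    have := PySem.List.sorted_pairwise scooters (fun x => x)
    simpa using this
  exact loop_eq finish _ (getD_mono _ hp) _ 0 0 0 (by omega) (by omega) (by omega)
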